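-- pv_equiv track=rewrite | github.com/HugoOrielso/pythonBackend | app.py | es_escalar
-- ===== SOURCE A (Python) =====
-- def es_cuadrada(matriz):
--     return all(len(fila) == len(matriz) for fila in matriz)
--
-- def es_diagonal(matriz):
--     if not es_cuadrada(matriz):
--         return False
--     for i in range(len(matriz)):
--         for j in range(len(matriz[i])):
--             if i != j and matriz[i][j] != 0:
--                 return False
--     return True
--
-- def es_escalar(matriz):
--     if not es_diagonal(matriz):
--         return False
--     valor = matriz[0][0]
--     for i in range(1, len(matriz)):
--         if matriz[i][i] != valor:
--             return False
--     return True
-- ===== SOURCE B (Python) =====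
-- def es_escalar(matriz):
--     n = len(matriz)
--     if len(matriz[0]) != n:
--         return False
--     valor = matriz[0][0]
--     return matriz == [[valor if j == i else 0 for j in range(n)] for i in range(n)]
-- ===== Notes on version B (the rewrite author's own statement) =====
-- stated objective: alternative
-- what changed: Instead of scanning entries with staged checks (squareness, off-diagonal zeros, diagonal equality), B constructs the target scalar matrix valor*I_n and tests the input for structural equality with it.
import Mathlib
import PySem

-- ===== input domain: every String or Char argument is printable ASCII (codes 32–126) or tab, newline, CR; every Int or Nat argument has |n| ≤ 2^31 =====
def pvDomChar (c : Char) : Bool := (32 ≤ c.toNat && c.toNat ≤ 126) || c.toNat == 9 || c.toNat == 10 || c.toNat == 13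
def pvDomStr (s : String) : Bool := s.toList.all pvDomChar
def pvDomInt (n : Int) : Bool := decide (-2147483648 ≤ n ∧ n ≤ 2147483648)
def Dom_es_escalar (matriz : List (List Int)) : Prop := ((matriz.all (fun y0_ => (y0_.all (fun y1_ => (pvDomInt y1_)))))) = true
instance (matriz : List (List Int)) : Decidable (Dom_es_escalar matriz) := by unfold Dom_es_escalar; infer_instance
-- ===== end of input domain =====

-- B replaces A's staged scans (squareness, off-diagonal zeros, diagonal equality) by
-- constructing the target scalar matrix valor·I_n and testing structural equality (objective: alternative).

-- ===== PORT A =====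
def es_cuadrada (matriz : List (List Int)) : Bool :=
  matriz.all (fun fila => fila.length == matriz.length)

def es_diagonal (matriz : List (List Int)) : Bool :=
  if !es_cuadrada matriz then false
  else
    (List.range matriz.length).all (fun i =>
      (List.range ((matriz.getD i []).length)).all (fun j =>
        !(i != j && (matriz.getD i []).getD j 0 != 0)))

def es_escalar (matriz : List (List Int)) : Bool :=
  if !es_diagonal matriz then false
  else
    let valor := (matriz.getD 0 []).getD 0 0
    -- range(1, len(matriz))
    (List.range' 1 (matriz.length - 1)).all (fun i =>
      !((matriz.getD i []).getD i 0 != valor))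

-- ===== PORT B =====
def es_escalar_alt (matriz : List (List Int)) : Bool :=
  let n := matriz.length
  if (matriz.getD 0 []).length != n then false
  else
    let valor := (matriz.getD 0 []).getD 0 0
    matriz == (List.range n).map (fun i => (List.range n).map (fun j => if j == i then valor else 0))

-- ===== PRECONDITION & SPEC =====
-- Pre_ excludes only the empty matrix, on which both Pythons raise IndexError (matriz[0][0]).
def Pre_es_escalar (matriz : List (List Int)) : Prop := matriz ≠ []
instance (matriz : List (List Int)) : Decidable (Pre_es_escalar matriz) := by unfold Pre_es_escalar; infer_instance
def pvWitness_es_escalar : List (List Int) := [[3, 0], [0, 3]]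

def Spec_es_escalar (matriz : List (List Int)) (out : Bool) : Prop := out = es_escalar_alt matriz
instance (matriz : List (List Int)) (out : Bool) : Decidable (Spec_es_escalar matriz out) := by unfold Spec_es_escalar; infer_instance

-- ===== CLAIM (what is proved, stated in full; the proofs are below) =====
def Claim_equal_es_escalar : Prop := ∀ (matriz : List (List Int)), Dom_es_escalar matriz → Pre_es_escalar matriz → Spec_es_escalar matriz (es_escalar matriz)

-- ===== LEMMAS AND PROOFS =====

-- the scalar template matrix B builds
def tmpl (m : List (List Int)) : List (List Int) :=
  (List.range m.length).map (fun i =>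
    (List.range m.length).map (fun j => if j == i then (m.getD 0 []).getD 0 0 else 0))

-- the pointwise characterisation both programs are reduced to
def Q (m : List (List Int)) : Prop :=
  ∀ i < m.length, ∀ j < m.length,
    (m.getD i []).getD j 0 = if j = i then (m.getD 0 []).getD 0 0 else 0

theorem square_row_len (m : List (List Int)) (h : es_cuadrada m = true)
    (i : ℕ) (hi : i < m.length) : (m.getD i []).length = m.length := by
  unfold es_cuadrada at h
  simp only [List.all_eq_true, beq_iff_eq] at h
  rw [List.getD_eq_getElem _ _ hi]
  exact h _ (List.getElem_mem hi)

theorem tmpl_eq_iff (m : List (List Int)) (hsq : es_cuadrada m = true) :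
    m = tmpl m ↔ Q m := by
  constructor
  · intro hEq i hi j hj
    have hrow : m.getD i [] = (List.range m.length).map
        (fun j => if j == i then (m.getD 0 []).getD 0 0 else 0) := by
      conv_lhs => rw [hEq]
      rw [tmpl, List.getD_eq_getElem _ _ (by simpa [tmpl] using hi)]
      simp
    rw [hrow, List.getD_eq_getElem _ _ (by simpa using hj)]
    simp
  · intro hQ
    apply List.ext_getElem (by simp [tmpl])
    intro i hi hi'
    have hi0 : i < m.length := hi
    have hrl := square_row_len m hsq i hi0
    apply List.ext_getElem
    · rw [List.getD_eq_getElem _ _ hi0] at hrl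
      simpa [tmpl] using hrl
    · intro j hj hj'
      have hjn : j < m.length := by
        rw [← List.getD_eq_getElem m [] hi0, hrl] at hj; exact hj
      have := hQ i hi0 j hjn
      rw [List.getD_eq_getElem _ _ hi0, List.getD_eq_getElem _ _ hj] at this
      simp only [tmpl, List.getElem_map, List.getElem_range]
      rw [this]
      simp
  
theorem not_square_ne_tmpl (m : List (List Int)) (h : es_cuadrada m = false) :
    m ≠ tmpl m := by
  unfold es_cuadrada at h
  simp only [List.all_eq_false] at h
  obtain ⟨fila, hmem, hne⟩ := h
  intro hEq
  apply hne
  rw [hEq] at hmem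
  simp only [tmpl, List.mem_map, List.mem_range] at hmem
  obtain ⟨i, _, rfl⟩ := hmem
  simp

theorem diag_true_off (m : List (List Int)) (hsq : es_cuadrada m = true)
    (hd : es_diagonal m = true) :
    ∀ i < m.length, ∀ j < (m.getD i []).length, i ≠ j → (m.getD i []).getD j 0 = 0 := by
  unfold es_diagonal at hd
  rw [if_neg (by simp [hsq])] at hd
  simp only [List.all_eq_true, List.mem_range] at hd
  intro i hi j hj hij
  have := hd i hi j hj
  simp only [Bool.not_eq_eq_eq_not, Bool.not_true, Bool.and_eq_false_iff,
    bne_eq_false_iff_eq] at this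
  rcases this with h | h
  · exact absurd h hij
  · exact h

theorem Q_imp_diag (m : List (List Int)) (hsq : es_cuadrada m = true) (hQ : Q m) :
    es_diagonal m = true := by
  unfold es_diagonal
  rw [if_neg (by simp [hsq])]
  simp only [List.all_eq_true, List.mem_range]
  intro i hi j hj
  rw [square_row_len m hsq i hi] at hj
  simp only [Bool.not_eq_eq_eq_not, Bool.not_true, Bool.and_eq_false_iff,
    bne_eq_false_iff_eq]
  by_cases hij : i = j
  · exact Or.inl (by simpa using hij)
  · exact Or.inr (by rw [hQ i hi j hj, if_neg (fun h => hij h.symm)])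

theorem A_true_iff_Q (m : List (List Int)) (hsq : es_cuadrada m = true) :
    es_escalar m = true ↔ Q m := by
  constructor
  · intro hA
    have hd : es_diagonal m = true := by
      by_contra hd
      simp only [Bool.not_eq_true] at hd
      simp [es_escalar, hd] at hA
    have hoff := diag_true_off m hsq hd
    have hdiag : ∀ i, 1 ≤ i → i < m.length → (m.getD i []).getD i 0 = (m.getD 0 []).getD 0 0 := by
      rw [es_escalar, if_neg (by simp [hd])] at hA
      simp only [List.all_eq_true, List.mem_range', Bool.not_eq_eq_eq_not,
        Bool.not_true, bne_eq_false_iff_eq] at hA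
      intro i h1 h2
      have := hA i ⟨i - 1, by omega, by omega⟩
      simpa using this
    intro i hi j hj
    by_cases hij : j = i
    · subst hij
      rw [if_pos rfl]
      rcases Nat.eq_zero_or_pos j with h0 | h0
      · subst h0; rfl
      · exact hdiag j h0 hi
    · rw [if_neg hij]
      exact hoff i hi j (by rw [square_row_len m hsq i hi]; exact hj) (fun h => hij h.symm)
  · intro hQ
    have hd := Q_imp_diag m hsq hQ
    rw [es_escalar, if_neg (by simp [hd])]
    simp only [List.all_eq_true, List.mem_range', Bool.not_eq_eq_eq_not,
      Bool.not_true, bne_eq_false_iff_eq]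
    intro i hi
    obtain ⟨k, hk, rfl⟩ := hi
    have := hQ (1 + 1 * k) (by omega) (1 + 1 * k) (by omega)
    simpa using this

theorem es_escalar_spec_aux (m : List (List Int)) (hne : m ≠ []) :
    es_escalar m = es_escalar_alt m := by
  by_cases h0 : (m.getD 0 []).length = m.length
  case neg =>
    have hB : es_escalar_alt m = false := by
      unfold es_escalar_alt
      rw [if_pos (by simpa [bne_iff_ne] using h0)]
    have hsq : es_cuadrada m = false := by
      unfold es_cuadrada
      simp only [List.all_eq_false]
      refine ⟨m.getD 0 [], ?_, by simpa using h0⟩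
      rw [List.getD_eq_getElem _ _ (by exact List.length_pos_iff.mpr hne)]
      exact List.getElem_mem _
    rw [hB]
    simp [es_escalar, es_diagonal, hsq]
  case pos =>
  have hB : es_escalar_alt m = (m == tmpl m) := by
    unfold es_escalar_alt
    rw [if_neg (by simpa [bne_iff_ne] using h0)]
    rfl
  cases hsq : es_cuadrada m with
  | false =>
    have hA : es_escalar m = false := by
      simp [es_escalar, es_diagonal, hsq]
    rw [hA, hB]
    exact (beq_eq_false_iff_ne.mpr (not_square_ne_tmpl m hsq)).symm
  | true =>
    rw [hB, Bool.eq_iff_iff, A_true_iff_Q m hsq, beq_iff_eq]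
    exact (tmpl_eq_iff m hsq).symm

-- ===== VERDICT (by name: the statement is the Claim_ definition above) =====
theorem es_escalar_spec : Claim_equal_es_escalar := by
  intro m _ hpre
  exact es_escalar_spec_aux m hpre
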